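-- pv_equiv track=rewrite | github.com/Shinbatsu/Lego-Scrapper | parser.py | parse_toy_info
-- ===== SOURCE A (Python) =====
-- from typing import List, Dict, Tuple, Optional
--
-- def parse_toy_info(info_list: List[str]) -> Dict[str, Optional[str]]:
--     info = {'age': None, 'pieces': None, 'rating': None}
--
--     for item in info_list:
--         if '+' in item:
--             info['age'] = item
--         elif '.' in item:
--             info['rating'] = item
--         else:
--             info['pieces'] = item
--     return info
-- ===== SOURCE B (Python) =====
-- from typing import List, Dict, Optional
--
-- def parse_toy_info(info_list: List[str]) -> Dict[str, Optional[str]]: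
--     age = next((x for x in reversed(info_list) if '+' in x), None)
--     pieces = next((x for x in reversed(info_list) if '+' not in x and '.' not in x), None)
--     rating = next((x for x in reversed(info_list) if '.' in x and '+' not in x), None)
--     return {'age': age, 'pieces': pieces, 'rating': rating}
-- ===== Notes on version B (the rewrite author's own statement) =====
-- stated objective: alternative
-- what changed: Replaces the single mutating pass over a dict with three independent right-to-left first-match scans (one per field), encoding the elif priority in each predicate.
import Mathlib
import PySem

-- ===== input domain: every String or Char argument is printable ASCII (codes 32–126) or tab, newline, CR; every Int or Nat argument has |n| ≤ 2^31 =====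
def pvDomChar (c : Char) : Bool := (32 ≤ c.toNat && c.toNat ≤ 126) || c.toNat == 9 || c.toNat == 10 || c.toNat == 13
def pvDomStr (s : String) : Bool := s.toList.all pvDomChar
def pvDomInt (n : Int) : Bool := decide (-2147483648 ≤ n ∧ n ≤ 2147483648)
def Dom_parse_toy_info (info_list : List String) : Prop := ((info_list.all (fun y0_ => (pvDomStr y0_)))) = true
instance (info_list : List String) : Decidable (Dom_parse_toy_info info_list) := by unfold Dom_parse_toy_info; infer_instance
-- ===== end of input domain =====

-- B computes each field by an independent right-to-left first-match scan instead of A's single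
-- mutating pass over a dict (objective: alternative decomposition; same cost).

-- ===== PORT A =====
-- state = (age, pieces, rating), mirroring A's dict with its fixed key order
def pvStepA (s : Option String × Option String × Option String) (item : String) :
    Option String × Option String × Option String :=
  if PySem.Str.isIn "+" item then (some item, s.2.1, s.2.2)
  else if PySem.Str.isIn "." item then (s.1, s.2.1, some item)
  else (s.1, some item, s.2.2)

def parse_toy_info (info_list : List String) : List (String × Option String) :=
  let s := info_list.foldl pvStepA (none, none, none)
  [("age", s.1), ("pieces", s.2.1), ("rating", s.2.2)]

-- ===== PORT B =====
def parse_toy_info_alt (info_list : List String) : List (String × Option String) :=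
  let age := info_list.reverse.find? (fun x => PySem.Str.isIn "+" x)
  let pieces := info_list.reverse.find? (fun x => !PySem.Str.isIn "+" x && !PySem.Str.isIn "." x)
  let rating := info_list.reverse.find? (fun x => PySem.Str.isIn "." x && !PySem.Str.isIn "+" x)
  [("age", age), ("pieces", pieces), ("rating", rating)]

-- ===== PRECONDITION & SPEC =====
def Spec_parse_toy_info (info_list : List String) (out : List (String × Option String)) : Prop := out = parse_toy_info_alt info_list
instance (info_list : List String) (out : List (String × Option String)) : Decidable (Spec_parse_toy_info info_list out) := by unfold Spec_parse_toy_info; infer_instance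

-- ===== CLAIM (what is proved, stated in full; the proofs are below) =====
def Claim_equal_parse_toy_info : Prop := ∀ (info_list : List String), Dom_parse_toy_info info_list → Spec_parse_toy_info info_list (parse_toy_info info_list)

-- ===== LEMMAS AND PROOFS =====

theorem pvFoldl_eq (xs : List String) (s : Option String × Option String × Option String) :
    xs.foldl pvStepA s =
      ((xs.reverse.find? (fun x => PySem.Str.isIn "+" x)).or s.1,
       (xs.reverse.find? (fun x => !PySem.Str.isIn "+" x && !PySem.Str.isIn "." x)).or s.2.1,
       (xs.reverse.find? (fun x => PySem.Str.isIn "." x && !PySem.Str.isIn "+" x)).or s.2.2) := by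
  induction xs generalizing s with
  | nil => simp
  | cons x xs ih =>
    simp only [List.foldl_cons, ih, List.reverse_cons, List.find?_append]
    unfold pvStepA
    by_cases hp : PySem.Chars.isIn ['+'] x.toList <;> by_cases hd : PySem.Chars.isIn ['.'] x.toList <;>
      simp [hp, hd, List.find?, PySem.Str.isIn]

-- ===== VERDICT (by name: the statement is the Claim_ definition above) =====
theorem parse_toy_info_spec : Claim_equal_parse_toy_info := by
  intro l _
  unfold Spec_parse_toy_info parse_toy_info parse_toy_info_alt
  simp [pvFoldl_eq]
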